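-- pv_equiv track=rewrite | github.com/phys-sims/cpa-sim | src/cpa_sim/reporting/report.py | _group_artifacts
-- ===== SOURCE A (Python) =====
-- def _group_artifacts(artifacts: dict[str, str]) -> dict[str, dict[str, str]]:
--     grouped: dict[str, dict[str, str]] = {}
--     for key, value in artifacts.items():
--         if "." in key:
--             stage, artifact_name = key.split(".", 1)
--         else:
--             stage, artifact_name = "run", key
--         grouped.setdefault(stage, {})[artifact_name] = value
--     return grouped
-- ===== SOURCE B (Python) =====
-- def _split_key(key):
--     if "." in key:
--         stage, artifact_name = key.split(".", 1)
--         return stage, artifact_name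
--     return "run", key
--
--
-- def _group_artifacts(artifacts: dict[str, str]) -> dict[str, dict[str, str]]:
--     triples = [(*_split_key(key), value) for key, value in artifacts.items()]
--     stages = list(dict.fromkeys(stage for stage, _, _ in triples))
--     return {s: {name: value for stage, name, value in triples if stage == s}
--             for s in stages}
-- ===== Notes on version B (the rewrite author's own statement) =====
-- stated objective: idiomatic
-- what changed: Replaces the single-pass setdefault-into-nested-dict loop by a map of keys to (stage, name, value) triples, an ordered dedup of the stages (dict.fromkeys), and a dict/dict comprehension that builds each stage's inner dict by filtering the triples.
import Mathlib
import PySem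

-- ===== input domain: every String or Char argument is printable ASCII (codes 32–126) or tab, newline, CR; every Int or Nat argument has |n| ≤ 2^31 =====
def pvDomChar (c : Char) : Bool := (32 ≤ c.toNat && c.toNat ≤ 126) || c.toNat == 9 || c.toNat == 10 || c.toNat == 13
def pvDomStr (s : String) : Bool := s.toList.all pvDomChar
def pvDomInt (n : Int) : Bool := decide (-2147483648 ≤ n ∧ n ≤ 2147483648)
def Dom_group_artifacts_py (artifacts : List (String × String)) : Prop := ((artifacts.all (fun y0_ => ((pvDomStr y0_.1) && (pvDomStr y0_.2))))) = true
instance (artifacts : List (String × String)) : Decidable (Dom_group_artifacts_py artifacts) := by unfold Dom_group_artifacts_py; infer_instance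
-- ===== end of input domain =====

-- B replaces A's single-pass setdefault loop by a map/dedup/group-per-stage decomposition (objective: idiomatic); same return value.

-- ===== PORT A =====
-- key.split(".", 1) under the guard '"." in key' always yields exactly two pieces;
-- the fallback arm of the match is unreachable.
def pvSplitA (key : String) : String × String :=
  if PySem.Str.isIn "." key then
    match (PySem.Str.splitMax? key "." 1).getD [key] with
    | s :: n :: _ => (s, n)
    | _ => ("run", key)
  else ("run", key)

-- grouped.setdefault(stage, {})[name] = value ≡ grouped.insert stage ((grouped.getD stage ∅).insert name value)
-- (PySem.Dict.insert overwrites in place, so the entry keeps its position exactly as setdefault does).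
def group_artifacts_py (artifacts : List (String × String)) : List (String × List (String × String)) :=
  let grouped : PySem.Dict String (PySem.Dict String String) :=
    artifacts.foldl (fun grouped kv =>
      let sn := pvSplitA kv.1
      grouped.insert sn.1 ((grouped.getD sn.1 PySem.Dict.empty).insert sn.2 kv.2)) PySem.Dict.empty
  grouped.items.map (fun p => (p.1, p.2.items))

-- ===== PORT B =====
def pvSplitB (key : String) : String × String :=
  if PySem.Str.isIn "." key then
    match (PySem.Str.splitMax? key "." 1).getD [key] with
    | s :: n :: _ => (s, n)
    | _ => ("run", key)
  else ("run", key)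

-- the dict comprehension {name: value for stage, name, value in triples if stage == s}
def pvInnerB (s : String) (ts : List (String × String × String)) : List (String × String) :=
  (ts.foldl (fun d t => if t.1 == s then PySem.Dict.insert d t.2.1 t.2.2 else d)
    (PySem.Dict.empty : PySem.Dict String String)).items

def group_artifacts_py_alt (artifacts : List (String × String)) : List (String × List (String × String)) :=
  let triples := artifacts.map (fun kv => ((pvSplitB kv.1).1, (pvSplitB kv.1).2, kv.2))
  let stages := PySem.List.dedup (triples.map (·.1))
  stages.map (fun s => (s, pvInnerB s triples))

-- ===== PRECONDITION & SPEC =====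
def Spec_group_artifacts_py (artifacts : List (String × String)) (out : List (String × List (String × String))) : Prop := out = group_artifacts_py_alt artifacts
instance (artifacts : List (String × String)) (out : List (String × List (String × String))) : Decidable (Spec_group_artifacts_py artifacts out) := by unfold Spec_group_artifacts_py; infer_instance

-- ===== CLAIM (what is proved, stated in full; the proofs are below) =====
def Claim_equal_group_artifacts_py : Prop := ∀ (artifacts : List (String × String)), Dom_group_artifacts_py artifacts → Spec_group_artifacts_py artifacts (group_artifacts_py artifacts)

-- ===== LEMMAS AND PROOFS =====

-- A's fold, abstracted over the starting dict
def pvFoldA (d : PySem.Dict String (PySem.Dict String String)) (xs : List (String × String)) :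
    PySem.Dict String (PySem.Dict String String) :=
  xs.foldl (fun grouped kv =>
    let sn := pvSplitA kv.1
    grouped.insert sn.1 ((grouped.getD sn.1 PySem.Dict.empty).insert sn.2 kv.2)) d

lemma pvSplitB_eq_A : pvSplitB = pvSplitA := rfl

lemma pvFoldA_keys (xs : List (String × String)) (d) :
    (pvFoldA d xs).keys = PySem.Set.update d.keys (xs.map (fun kv => (pvSplitA kv.1).1)) := by
  simpa [pvFoldA] using
    PySem.Dict.keys_foldl_insert_key (l := xs) (d := d)
      (key := fun kv => (pvSplitA kv.1).1)
      (f := fun grouped kv => ((grouped.getD (pvSplitA kv.1).1 PySem.Dict.empty).insert (pvSplitA kv.1).2 kv.2))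

lemma pvFoldA_getD (xs : List (String × String)) (s : String) :
    ∀ d, (pvFoldA d xs).getD s PySem.Dict.empty =
      xs.foldl (fun e kv => if (pvSplitA kv.1).1 == s then e.insert (pvSplitA kv.1).2 kv.2 else e)
        (d.getD s PySem.Dict.empty) := by
  induction xs with
  | nil => intro d; simp [pvFoldA]
  | cons kv xs ih =>
    intro d
    simp only [pvFoldA, List.foldl_cons] at *
    rw [ih]
    by_cases h : (pvSplitA kv.1).1 = s
    · subst h
      simp [PySem.Dict.getD_insert_self]
    · have hb : ((pvSplitA kv.1).1 == s) = false := by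
        simp [h]
      rw [PySem.Dict.getD_insert_of_ne _ _ _ (Ne.symm h), hb]
      simp

theorem group_artifacts_py_spec : Claim_equal_group_artifacts_py := by
  intro artifacts _
  unfold Spec_group_artifacts_py
  unfold group_artifacts_py group_artifacts_py_alt
  simp only [pvSplitB_eq_A]
  have hfold : (artifacts.foldl (fun grouped kv =>
      let sn := pvSplitA kv.1
      grouped.insert sn.1 ((grouped.getD sn.1 PySem.Dict.empty).insert sn.2 kv.2)) PySem.Dict.empty)
      = pvFoldA PySem.Dict.empty artifacts := rfl
  rw [hfold]
  set G := pvFoldA PySem.Dict.empty artifacts with hG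
  -- keys of G are the deduped stage list
  have hkeys : G.keys = PySem.List.dedup (artifacts.map (fun kv => (pvSplitA kv.1).1)) := by
    rw [hG, pvFoldA_keys]
    simp [PySem.Dict.keys_empty, PySem.List.dedup_eq_ofList, PySem.Set.update,
      PySem.Set.ofList_eq_foldl]
  have hnodup : G.keys.Nodup := by
    rw [hkeys]
    simp [PySem.List.dedup_eq_ofList,
      PySem.Set.nodup_ofList (xs := artifacts.map (fun kv => (pvSplitA kv.1).1))]
  -- each item of G pairs a stage with its per-stage inner dict
  have hitems : G.items.map (fun p => (p.1, p.2.items)) =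
      G.keys.map (fun s => (s, (G.getD s PySem.Dict.empty).items)) := by
    have : G.keys = G.items.map (·.1) := rfl
    rw [this, List.map_map]
    apply List.map_congr_left
    intro p hp
    have hget : G.get? p.1 = some p.2 :=
      PySem.Dict.get?_of_mem_items G (by simpa using hp) hnodup
    simp [Function.comp, PySem.Dict.getD_eq_get?_getD, hget]
  rw [hitems, hkeys]
  -- rewrite the per-stage inner dicts via pvFoldA_getD
  have htri : (artifacts.map (fun kv => ((pvSplitA kv.1).1, (pvSplitA kv.1).2, kv.2))).map (·.1)
      = artifacts.map (fun kv => (pvSplitA kv.1).1) := by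
    simp [List.map_map]
  rw [htri]
  apply List.map_congr_left
  intro s _
  have hin : pvInnerB s (artifacts.map (fun kv => ((pvSplitA kv.1).1, (pvSplitA kv.1).2, kv.2))) =
      (artifacts.foldl (fun e kv => if (pvSplitA kv.1).1 == s then e.insert (pvSplitA kv.1).2 kv.2 else e)
        (PySem.Dict.empty : PySem.Dict String String)).items := by
    simp [pvInnerB, List.foldl_map]
  rw [hG, pvFoldA_getD, hin]
  simp [PySem.Dict.getD_empty]
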